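-- pv_equiv track=rewrite | github.com/josemingorance/transpara | backend/apps/contracts/etl/normalizers.py | _infer_contract_type
-- ===== SOURCE A (Python) =====
-- from typing import Any
--
-- def _infer_contract_type(item_type: str, raw_data: dict[str, Any]) -> str:
--     """
--     Infer contract type from BOE item type and title.
--
--     Args:
--         item_type: BOE item type classification
--         raw_data: Raw BOE data
--
--     Returns:
--         Standardized contract type
--     """
--     if item_type == "CONTRACT":
--         return "SUPPLIES"  # BOE contracts are typically supplies
--
--     # Check title and section for type hints
--     title_lower = raw_data.get("title", "").lower()
--     section_lower = raw_data.get("section", "").lower()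
--
--     if any(word in title_lower or word in section_lower for word in ["obra", "construcción", "work"]):
--         return "WORKS"
--     elif any(
--         word in title_lower or word in section_lower
--         for word in ["servicio", "asistencia", "service", "assistance"]
--     ):
--         return "SERVICES"
--     elif any(
--         word in title_lower or word in section_lower
--         for word in ["suministro", "equipo", "material", "supplies", "equipment"]
--     ):
--         return "SUPPLIES"
--     else:
--         return "OTHER"
-- ===== SOURCE B (Python) =====
-- from typing import Any
--
-- # Flat keyword -> priority map; smaller priority = higher precedence.
-- _KEYWORD_PRIORITY = {
--     "obra": 0, "construcción": 0, "work": 0,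
--     "servicio": 1, "asistencia": 1, "service": 1, "assistance": 1,
--     "suministro": 2, "equipo": 2, "material": 2, "supplies": 2, "equipment": 2,
-- }
-- _RESULTS = ["WORKS", "SERVICES", "SUPPLIES", "OTHER"]
--
--
-- def _infer_contract_type(item_type: str, raw_data: dict[str, Any]) -> str:
--     if item_type == "CONTRACT":
--         return "SUPPLIES"
--     title_lower = raw_data.get("title", "").lower()
--     section_lower = raw_data.get("section", "").lower()
--     best = 3
--     for kw, p in _KEYWORD_PRIORITY.items():
--         if (kw in title_lower or kw in section_lower) and p < best:
--             best = p
--     return _RESULTS[best]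
-- ===== Notes on version B (the rewrite author's own statement) =====
-- stated objective: alternative
-- what changed: Instead of an if/elif chain of short-circuiting group checks, B scans one flat keyword->priority map, aggregates the minimum priority among all matched keywords, and indexes a results table with it (default 3 = OTHER).
import Mathlib
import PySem

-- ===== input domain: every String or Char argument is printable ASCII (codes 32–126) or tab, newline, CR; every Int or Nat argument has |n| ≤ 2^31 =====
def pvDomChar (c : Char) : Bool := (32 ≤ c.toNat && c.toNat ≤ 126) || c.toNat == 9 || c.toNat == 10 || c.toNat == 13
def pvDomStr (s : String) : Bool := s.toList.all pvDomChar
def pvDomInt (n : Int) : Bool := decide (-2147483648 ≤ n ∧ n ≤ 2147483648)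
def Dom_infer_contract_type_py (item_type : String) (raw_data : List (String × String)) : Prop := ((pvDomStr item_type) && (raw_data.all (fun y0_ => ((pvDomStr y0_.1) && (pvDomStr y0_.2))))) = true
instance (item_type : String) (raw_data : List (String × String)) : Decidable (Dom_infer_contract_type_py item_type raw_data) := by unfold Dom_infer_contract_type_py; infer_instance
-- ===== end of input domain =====

-- B replaces A's first-match if/elif keyword-group chain by one accumulator pass over a flat
-- keyword->priority map taking the minimum matched priority, then indexes a results table (objective: alternative).

-- ===== PORT A =====
def infer_contract_type_py (item_type : String) (raw_data : List (String × String)) : String :=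
  if item_type == "CONTRACT" then "SUPPLIES"
  else
    let title_lower := PySem.Str.lower (PySem.Dict.getD ⟨raw_data⟩ "title" "")
    let section_lower := PySem.Str.lower (PySem.Dict.getD ⟨raw_data⟩ "section" "")
    if ["obra", "construcción", "work"].any
        (fun w => PySem.Str.isIn w title_lower || PySem.Str.isIn w section_lower) then "WORKS"
    else if ["servicio", "asistencia", "service", "assistance"].any
        (fun w => PySem.Str.isIn w title_lower || PySem.Str.isIn w section_lower) then "SERVICES"
    else if ["suministro", "equipo", "material", "supplies", "equipment"].any
        (fun w => PySem.Str.isIn w title_lower || PySem.Str.isIn w section_lower) then "SUPPLIES"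
    else "OTHER"

-- ===== PORT B =====
def pvKeywordPriority : List (String × Nat) :=
  [ ("obra", 0), ("construcción", 0), ("work", 0)
  , ("servicio", 1), ("asistencia", 1), ("service", 1), ("assistance", 1)
  , ("suministro", 2), ("equipo", 2), ("material", 2), ("supplies", 2), ("equipment", 2) ]

def pvResults : List String := ["WORKS", "SERVICES", "SUPPLIES", "OTHER"]

def infer_contract_type_py_alt (item_type : String) (raw_data : List (String × String)) : String :=
  if item_type == "CONTRACT" then "SUPPLIES"
  else
    let title_lower := PySem.Str.lower (PySem.Dict.getD ⟨raw_data⟩ "title" "")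
    let section_lower := PySem.Str.lower (PySem.Dict.getD ⟨raw_data⟩ "section" "")
    let best := pvKeywordPriority.foldl
      (fun best kv =>
        if (PySem.Str.isIn kv.1 title_lower || PySem.Str.isIn kv.1 section_lower) && kv.2 < best
        then kv.2 else best) 3
    -- _RESULTS[best]: best is always ≤ 3, so plain in-range indexing; getD's default is never used
    pvResults.getD best ""

-- ===== PRECONDITION & SPEC =====
def Spec_infer_contract_type_py (item_type : String) (raw_data : List (String × String)) (out : String) : Prop := out = infer_contract_type_py_alt item_type raw_data
instance (item_type : String) (raw_data : List (String × String)) (out : String) : Decidable (Spec_infer_contract_type_py item_type raw_data out) := by unfold Spec_infer_contract_type_py; infer_instance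

-- ===== CLAIM (what is proved, stated in full; the proofs are below) =====
def Claim_equal_infer_contract_type_py : Prop := ∀ (item_type : String) (raw_data : List (String × String)), Dom_infer_contract_type_py item_type raw_data → Spec_infer_contract_type_py item_type raw_data (infer_contract_type_py item_type raw_data)

-- ===== LEMMAS AND PROOFS =====

-- One group of keywords, all with the same priority c: the min-fold step over it
-- lowers the accumulator to c exactly when some keyword matches and c is smaller.
theorem foldl_step_const (f : String → Bool) (c : Nat) (g : List String) : ∀ a : Nat,
    (g.map (fun w => (w, c))).foldl
      (fun best kv => if f kv.1 && kv.2 < best then kv.2 else best) a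
    = if g.any f && decide (c < a) then c else a := by
  induction g with
  | nil => intro a; simp
  | cons w g ih =>
    intro a
    simp only [List.map_cons, List.foldl_cons, List.any_cons, ih]
    by_cases hw : f w = true <;> by_cases hc : c < a <;>
      simp [hw, hc]

-- The flat table is the three constant-priority groups in order.
theorem pvKeywordPriority_split : pvKeywordPriority
    = (["obra", "construcción", "work"].map (fun w => (w, (0 : Nat))))
      ++ (["servicio", "asistencia", "service", "assistance"].map (fun w => (w, 1)))
      ++ (["suministro", "equipo", "material", "supplies", "equipment"].map (fun w => (w, 2))) := rfl

-- The first-match group chain equals min-priority aggregation over the flat keyword table.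
theorem chain_eq_minfold (f : String → Bool) :
    (if ["obra", "construcción", "work"].any f then "WORKS"
     else if ["servicio", "asistencia", "service", "assistance"].any f then "SERVICES"
     else if ["suministro", "equipo", "material", "supplies", "equipment"].any f then "SUPPLIES"
     else "OTHER")
    = pvResults.getD
        (pvKeywordPriority.foldl
          (fun best kv => if f kv.1 && kv.2 < best then kv.2 else best) 3) "" := by
  rw [pvKeywordPriority_split, List.foldl_append, List.foldl_append,
    foldl_step_const, foldl_step_const, foldl_step_const]
  by_cases h1 : (["obra", "construcción", "work"].any f) = true <;>
    by_cases h2 : (["servicio", "asistencia", "service", "assistance"].any f) = true <;>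
      by_cases h3 : (["suministro", "equipo", "material", "supplies", "equipment"].any f) = true <;>
        simp [h1, h2, h3, pvResults]

-- ===== VERDICT (by name: the statement is the Claim_ definition above) =====
theorem infer_contract_type_py_spec : Claim_equal_infer_contract_type_py := by
  intro item_type raw_data _
  unfold Spec_infer_contract_type_py infer_contract_type_py infer_contract_type_py_alt
  by_cases h0 : item_type == "CONTRACT"
  · simp [h0]
  · simp only [h0, Bool.false_eq_true, if_false]
    exact chain_eq_minfold
      (fun w => PySem.Str.isIn w (PySem.Str.lower (PySem.Dict.getD ⟨raw_data⟩ "title" ""))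
        || PySem.Str.isIn w (PySem.Str.lower (PySem.Dict.getD ⟨raw_data⟩ "section" "")))
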